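-- pv_equiv track=rewrite | github.com/asamiiAlam/SC | reflections/views.py | _get_music_suggestion
-- ===== SOURCE A (Python) =====
-- def _get_music_suggestion(user_message: str, dashboard_context: dict) -> dict:
--     msg = (user_message or "").lower().strip()
--     avg_stress = dashboard_context.get("avg_stress", 0)
--
--     if any(word in msg for word in ["stress", "stressed", "pressure", "overwhelmed"]):
--         return {
--             "music_type": "Calm",
--             "music_title": "Calm Piano",
--             "music_description": "Soft piano for stress relief",
--             "music_file": "music/calm_piano.mp3",
--         }
--
--     if any(word in msg for word in ["anxious", "anxiety", "panic", "worried", "nervous"]):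
--         return {
--             "music_type": "Breathing",
--             "music_title": "Breathing Ambience",
--             "music_description": "Gentle rain sound for calming down",
--             "music_file": "music/breathing_ambience.mp3",
--         }
--
--     if any(word in msg for word in ["focus", "concentrate", "distracted", "motivation"]):
--         return {
--             "music_type": "Focus",
--             "music_title": "Rain Focus",
--             "music_description": "Relaxing rain for concentration",
--             "music_file": "music/rain_focus.mp3",
--         }
--
--     if any(word in msg for word in ["tired", "sleep", "exhausted", "fatigue", "burnout"]):
--         return {
--             "music_type": "Rest",
--             "music_title": "Soft Ambient Reset",
--             "music_description": "Light ambient sound for rest and reset",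
--             "music_file": "music/soft_ambient.mp3",
--         }
--
--     if avg_stress >= 70:
--         return {
--             "music_type": "Calm",
--             "music_title": "Peaceful Piano",
--             "music_description": "Gentle piano for high-stress moments",
--             "music_file": "music/peaceful_piano.mp3",
--         }
--
--     return {
--         "music_type": "Study",
--         "music_title": "Deep Focus",
--         "music_description": "Steady background music for studying",
--         "music_file": "music/deep_focus.mp3",
--     }
-- ===== SOURCE B (Python) =====
-- # B: flat keyword->group-index map; the chosen track is the MINIMUM group index among
-- # all matching keywords (no sequential branching), then one table lookup.
-- _KEYWORD_GROUP = {
--     "stress": 0, "stressed": 0, "pressure": 0, "overwhelmed": 0,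
--     "anxious": 1, "anxiety": 1, "panic": 1, "worried": 1, "nervous": 1,
--     "focus": 2, "concentrate": 2, "distracted": 2, "motivation": 2,
--     "tired": 3, "sleep": 3, "exhausted": 3, "fatigue": 3, "burnout": 3,
-- }
--
-- _TRACKS = [
--     {"music_type": "Calm", "music_title": "Calm Piano",
--      "music_description": "Soft piano for stress relief",
--      "music_file": "music/calm_piano.mp3"},
--     {"music_type": "Breathing", "music_title": "Breathing Ambience",
--      "music_description": "Gentle rain sound for calming down",
--      "music_file": "music/breathing_ambience.mp3"},
--     {"music_type": "Focus", "music_title": "Rain Focus",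
--      "music_description": "Relaxing rain for concentration",
--      "music_file": "music/rain_focus.mp3"},
--     {"music_type": "Rest", "music_title": "Soft Ambient Reset",
--      "music_description": "Light ambient sound for rest and reset",
--      "music_file": "music/soft_ambient.mp3"},
--     {"music_type": "Calm", "music_title": "Peaceful Piano",
--      "music_description": "Gentle piano for high-stress moments",
--      "music_file": "music/peaceful_piano.mp3"},
--     {"music_type": "Study", "music_title": "Deep Focus",
--      "music_description": "Steady background music for studying",
--      "music_file": "music/deep_focus.mp3"},
-- ]
--
--
-- def _get_music_suggestion(user_message: str, dashboard_context: dict) -> dict: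
--     msg = (user_message or "").lower().strip()
--     hits = [g for kw, g in _KEYWORD_GROUP.items() if kw in msg]
--     if hits:
--         return dict(_TRACKS[min(hits)])
--     idx = 4 if dashboard_context.get("avg_stress", 0) >= 70 else 5
--     return dict(_TRACKS[idx])
-- ===== Notes on version B (the rewrite author's own statement) =====
-- stated objective: alternative
-- what changed: Instead of four sequential if/any branches, B collects the group index of every matching keyword from one flat keyword->group map and picks the track with the minimum index (min-aggregation, no short-circuit chain), with the stress-level fallback when no keyword matches.
import Mathlib
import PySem

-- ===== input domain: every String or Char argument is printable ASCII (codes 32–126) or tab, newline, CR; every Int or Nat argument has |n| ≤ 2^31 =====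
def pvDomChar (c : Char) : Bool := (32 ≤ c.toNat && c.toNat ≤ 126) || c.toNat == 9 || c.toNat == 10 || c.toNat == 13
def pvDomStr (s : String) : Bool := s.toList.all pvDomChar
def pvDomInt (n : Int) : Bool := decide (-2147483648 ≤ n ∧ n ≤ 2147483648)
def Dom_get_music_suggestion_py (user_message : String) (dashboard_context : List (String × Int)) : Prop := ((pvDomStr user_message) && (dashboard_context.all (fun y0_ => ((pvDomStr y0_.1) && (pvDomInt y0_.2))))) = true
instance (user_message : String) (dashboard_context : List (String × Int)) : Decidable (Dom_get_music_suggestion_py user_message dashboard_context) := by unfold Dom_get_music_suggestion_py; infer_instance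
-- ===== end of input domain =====

-- ===== PORT A =====
-- B replaces A's four sequential if/any branches by a min-aggregation over a flat
-- keyword->group-index map plus one table lookup; objective: alternative.
def get_music_suggestion_py (user_message : String) (dashboard_context : List (String × Int)) : List (String × String) :=
  -- msg = (user_message or "").lower().strip()   ('or ""' keeps user_message for non-empty strings)
  let msg := PySem.Str.strip (PySem.Str.lower (if user_message = "" then "" else user_message))
  let avg_stress : Int := PySem.Dict.getD (PySem.Dict.mk dashboard_context) "avg_stress" 0
  if ["stress", "stressed", "pressure", "overwhelmed"].any (fun word => PySem.Str.isIn word msg) then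
    [("music_type", "Calm"), ("music_title", "Calm Piano"),
     ("music_description", "Soft piano for stress relief"), ("music_file", "music/calm_piano.mp3")]
  else if ["anxious", "anxiety", "panic", "worried", "nervous"].any (fun word => PySem.Str.isIn word msg) then
    [("music_type", "Breathing"), ("music_title", "Breathing Ambience"),
     ("music_description", "Gentle rain sound for calming down"), ("music_file", "music/breathing_ambience.mp3")]
  else if ["focus", "concentrate", "distracted", "motivation"].any (fun word => PySem.Str.isIn word msg) then
    [("music_type", "Focus"), ("music_title", "Rain Focus"),
     ("music_description", "Relaxing rain for concentration"), ("music_file", "music/rain_focus.mp3")]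
  else if ["tired", "sleep", "exhausted", "fatigue", "burnout"].any (fun word => PySem.Str.isIn word msg) then
    [("music_type", "Rest"), ("music_title", "Soft Ambient Reset"),
     ("music_description", "Light ambient sound for rest and reset"), ("music_file", "music/soft_ambient.mp3")]
  else if avg_stress ≥ 70 then
    [("music_type", "Calm"), ("music_title", "Peaceful Piano"),
     ("music_description", "Gentle piano for high-stress moments"), ("music_file", "music/peaceful_piano.mp3")]
  else
    [("music_type", "Study"), ("music_title", "Deep Focus"),
     ("music_description", "Steady background music for studying"), ("music_file", "music/deep_focus.mp3")]

-- ===== PORT B =====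
-- the module-level _KEYWORD_GROUP dict of Source B (association list, insertion order)
def pvKeywordGroup : List (String × Nat) :=
  [("stress", 0), ("stressed", 0), ("pressure", 0), ("overwhelmed", 0),
   ("anxious", 1), ("anxiety", 1), ("panic", 1), ("worried", 1), ("nervous", 1),
   ("focus", 2), ("concentrate", 2), ("distracted", 2), ("motivation", 2),
   ("tired", 3), ("sleep", 3), ("exhausted", 3), ("fatigue", 3), ("burnout", 3)]

-- the module-level _TRACKS table of Source B
def pvTracks : List (List (String × String)) :=
  [ [("music_type", "Calm"), ("music_title", "Calm Piano"),
     ("music_description", "Soft piano for stress relief"), ("music_file", "music/calm_piano.mp3")],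
    [("music_type", "Breathing"), ("music_title", "Breathing Ambience"),
     ("music_description", "Gentle rain sound for calming down"), ("music_file", "music/breathing_ambience.mp3")],
    [("music_type", "Focus"), ("music_title", "Rain Focus"),
     ("music_description", "Relaxing rain for concentration"), ("music_file", "music/rain_focus.mp3")],
    [("music_type", "Rest"), ("music_title", "Soft Ambient Reset"),
     ("music_description", "Light ambient sound for rest and reset"), ("music_file", "music/soft_ambient.mp3")],
    [("music_type", "Calm"), ("music_title", "Peaceful Piano"),
     ("music_description", "Gentle piano for high-stress moments"), ("music_file", "music/peaceful_piano.mp3")],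
    [("music_type", "Study"), ("music_title", "Deep Focus"),
     ("music_description", "Steady background music for studying"), ("music_file", "music/deep_focus.mp3")] ]

-- hits = [g for kw, g in _KEYWORD_GROUP.items() if kw in msg], for substring predicate p = (· in msg)
def pvHits (p : String → Bool) : List Nat :=
  (pvKeywordGroup.filter (fun e => p e.1)).map (fun e => e.2)

def get_music_suggestion_py_alt (user_message : String) (dashboard_context : List (String × Int)) : List (String × String) :=
  let msg := PySem.Str.strip (PySem.Str.lower (if user_message = "" then "" else user_message))
  let hits := pvHits (fun kw => PySem.Str.isIn kw msg)
  -- 'if hits: return _TRACKS[min(hits)]' — min(hits) is PySem.List.min?, some ↔ hits nonempty;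
  -- _TRACKS[i] ported as getD (the index is always in range of the 6-entry literal table)
  match PySem.List.min? hits (fun x => x) with
  | some i => pvTracks.getD i []
  | none =>
    let idx := if PySem.Dict.getD (PySem.Dict.mk dashboard_context) "avg_stress" 0 ≥ 70 then 4 else 5
    pvTracks.getD idx []

-- ===== PRECONDITION & SPEC =====
def Spec_get_music_suggestion_py (user_message : String) (dashboard_context : List (String × Int)) (out : List (String × String)) : Prop := out = get_music_suggestion_py_alt user_message dashboard_context
instance (user_message : String) (dashboard_context : List (String × Int)) (out : List (String × String)) : Decidable (Spec_get_music_suggestion_py user_message dashboard_context out) := by unfold Spec_get_music_suggestion_py; infer_instance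

-- ===== CLAIM (what is proved, stated in full; the proofs are below) =====
def Claim_equal_get_music_suggestion_py : Prop := ∀ (user_message : String) (dashboard_context : List (String × Int)), Dom_get_music_suggestion_py user_message dashboard_context → Spec_get_music_suggestion_py user_message dashboard_context (get_music_suggestion_py user_message dashboard_context)

-- ===== LEMMAS AND PROOFS =====

-- min? of a Nat list that contains i and whose every element is ≥ i is some i
theorem pv_min_char (xs : List Nat) (i : Nat) (hmem : i ∈ xs)
    (hlb : ∀ x ∈ xs, i ≤ x) : PySem.List.min? xs (fun x => x) = some i := by
  cases hm : PySem.List.min? xs (fun x => x) with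
  | none =>
    rw [PySem.List.min?_eq_none_iff] at hm
    simp [hm] at hmem
  | some m =>
    have h1 : m ∈ xs := PySem.List.min?_mem hm
    have h2 : m ≤ i := PySem.List.min?_isMin hm i hmem
    exact congrArg some (le_antisymm h2 (hlb m h1))

theorem pv_mem_hits (p : String → Bool) (x : Nat) :
    x ∈ pvHits p ↔ ∃ e ∈ pvKeywordGroup, p e.1 = true ∧ e.2 = x := by
  simp [pvHits, List.mem_filter, List.mem_map]

-- first-match group index i: i is a hit and no hit is smaller
theorem pv_hits_min (p : String → Bool) (i : Nat) (hmem : i ∈ pvHits p)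
    (hlb : ∀ x ∈ pvHits p, i ≤ x) :
    PySem.List.min? (pvHits p) (fun x => x) = some i :=
  pv_min_char _ i hmem hlb

-- ===== VERDICT (by name: the statement is the Claim_ definition above) =====
set_option maxHeartbeats 1600000 in
theorem get_music_suggestion_py_spec : Claim_equal_get_music_suggestion_py := by
  intro um dc _
  unfold Spec_get_music_suggestion_py get_music_suggestion_py get_music_suggestion_py_alt
  generalize PySem.Str.strip (PySem.Str.lower (if um = "" then "" else um)) = msg
  cases h1 : ["stress", "stressed", "pressure", "overwhelmed"].any (fun w => PySem.Str.isIn w msg) with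
  | true =>
    have hmin : PySem.List.min? (pvHits (fun w => PySem.Str.isIn w msg)) (fun x => x) = some 0 := by
      apply pv_hits_min
      · rw [pv_mem_hits]
        simp at h1
        rcases h1 with h | h | h | h
        · exact ⟨("stress", 0), by simp [pvKeywordGroup], h, rfl⟩
        · exact ⟨("stressed", 0), by simp [pvKeywordGroup], h, rfl⟩
        · exact ⟨("pressure", 0), by simp [pvKeywordGroup], h, rfl⟩
        · exact ⟨("overwhelmed", 0), by simp [pvKeywordGroup], h, rfl⟩
      · intro x _; omega
    simp only [h1, hmin, if_true]
    rfl
  | false =>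
  cases h2 : ["anxious", "anxiety", "panic", "worried", "nervous"].any (fun w => PySem.Str.isIn w msg) with
  | true =>
    have hmin : PySem.List.min? (pvHits (fun w => PySem.Str.isIn w msg)) (fun x => x) = some 1 := by
      apply pv_hits_min
      · rw [pv_mem_hits]
        simp at h2
        rcases h2 with h | h | h | h | h
        · exact ⟨("anxious", 1), by simp [pvKeywordGroup], h, rfl⟩
        · exact ⟨("anxiety", 1), by simp [pvKeywordGroup], h, rfl⟩
        · exact ⟨("panic", 1), by simp [pvKeywordGroup], h, rfl⟩
        · exact ⟨("worried", 1), by simp [pvKeywordGroup], h, rfl⟩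
        · exact ⟨("nervous", 1), by simp [pvKeywordGroup], h, rfl⟩
      · intro x hx
        rw [pv_mem_hits] at hx
        simp at h1
        rcases hx with ⟨e, he, hpe, rfl⟩
        simp [pvKeywordGroup] at he
        rcases he with he|he|he|he|he|he|he|he|he|he|he|he|he|he|he|he|he|he <;>
          subst he <;> simp_all
    simp only [h1, h2, hmin, if_true, Bool.false_eq_true, if_false]
    rfl
  | false =>
  cases h3 : ["focus", "concentrate", "distracted", "motivation"].any (fun w => PySem.Str.isIn w msg) with
  | true =>
    have hmin : PySem.List.min? (pvHits (fun w => PySem.Str.isIn w msg)) (fun x => x) = some 2 := by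
      apply pv_hits_min
      · rw [pv_mem_hits]
        simp at h3
        rcases h3 with h | h | h | h
        · exact ⟨("focus", 2), by simp [pvKeywordGroup], h, rfl⟩
        · exact ⟨("concentrate", 2), by simp [pvKeywordGroup], h, rfl⟩
        · exact ⟨("distracted", 2), by simp [pvKeywordGroup], h, rfl⟩
        · exact ⟨("motivation", 2), by simp [pvKeywordGroup], h, rfl⟩
      · intro x hx
        rw [pv_mem_hits] at hx
        simp at h1 h2
        rcases hx with ⟨e, he, hpe, rfl⟩
        simp [pvKeywordGroup] at he
        rcases he with he|he|he|he|he|he|he|he|he|he|he|he|he|he|he|he|he|he <;>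
          subst he <;> simp_all
    simp only [h1, h2, h3, hmin, if_true, Bool.false_eq_true, if_false]
    rfl
  | false =>
  cases h4 : ["tired", "sleep", "exhausted", "fatigue", "burnout"].any (fun w => PySem.Str.isIn w msg) with
  | true =>
    have hmin : PySem.List.min? (pvHits (fun w => PySem.Str.isIn w msg)) (fun x => x) = some 3 := by
      apply pv_hits_min
      · rw [pv_mem_hits]
        simp at h4
        rcases h4 with h | h | h | h | h
        · exact ⟨("tired", 3), by simp [pvKeywordGroup], h, rfl⟩
        · exact ⟨("sleep", 3), by simp [pvKeywordGroup], h, rfl⟩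
        · exact ⟨("exhausted", 3), by simp [pvKeywordGroup], h, rfl⟩
        · exact ⟨("fatigue", 3), by simp [pvKeywordGroup], h, rfl⟩
        · exact ⟨("burnout", 3), by simp [pvKeywordGroup], h, rfl⟩
      · intro x hx
        rw [pv_mem_hits] at hx
        simp at h1 h2 h3
        rcases hx with ⟨e, he, hpe, rfl⟩
        simp [pvKeywordGroup] at he
        rcases he with he|he|he|he|he|he|he|he|he|he|he|he|he|he|he|he|he|he <;>
          subst he <;> simp_all
    simp only [h1, h2, h3, h4, hmin, if_true, Bool.false_eq_true, if_false]
    rfl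
  | false =>
    have hnil : pvHits (fun w => PySem.Str.isIn w msg) = [] := by
      simp at h1 h2 h3 h4
      simp [pvHits, List.filter_eq_nil_iff, pvKeywordGroup]
      simp_all
    have hmin : PySem.List.min? (pvHits (fun w => PySem.Str.isIn w msg)) (fun x => x) = none := by
      rw [PySem.List.min?_eq_none_iff]; exact hnil
    simp only [h1, h2, h3, h4, hmin, Bool.false_eq_true, if_false]
    by_cases hs : PySem.Dict.getD (PySem.Dict.mk dc) "avg_stress" 0 ≥ 70 <;>
      simp only [hs, if_true, if_false] <;> rfl
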